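-- pv_equiv track=rewrite | github.com/AluminumShark/2023_Programming_for_Business_Computing | hw_05/hw_05_2.py | troughs
-- ===== SOURCE A (Python) =====
-- def troughs(inlist, k = 2) :
--     if k < 1 :
--         k = 2
--     num = list()
--     for i in range(k, len(inlist) - k) :
--         if inlist[i - k : i + 1] == sorted(inlist[i - k : i + 1], reverse = True) \
--                 and inlist[i : i + k + 1] == sorted(inlist[i : i + k + 1])\
--                     and inlist[i - k] > inlist[i - k - 1]\
--                         and inlist[i + k] > inlist[i + k + 1]:
--                 num.append(i)
--     return num
-- ===== SOURCE B (Python) =====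
-- def _runs(xs):
--     # runs[i] = length of the maximal non-increasing run of xs ending at i
--     runs = []
--     prev = None
--     cur = 0
--     for x in xs:
--         cur = cur + 1 if prev is not None and prev >= x else 1
--         runs.append(cur)
--         prev = x
--     return runs
--
-- def troughs(inlist, k=2):
--     if k < 1:
--         k = 2
--     n = len(inlist)
--     if n < 2 * k + 2:
--         return []
--     down = _runs(inlist)
--     up = _runs(inlist[::-1])[::-1]
--     return [i for i in range(k + 1, n - k - 1) if down[i] == k + 1 and up[i] == k + 1]
-- ===== Notes on version B (the rewrite author's own statement) =====
-- stated objective: alternative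
-- what changed: A re-sorts two (k+1)-length slices at every candidate index; B instead precomputes non-increasing run lengths in one forward and one backward scan and tests each index by two run-length lookups; B also drops A's accidental negative-index wraparound at i=k (stated as D_) and returns where A raises IndexError at the right boundary (excluded by Pre_).
-- intended difference: On inputs where the trough test fires at the first loop index i=k, A's left guard index i-k-1 is -1, so Python wraps around to the last element of the list and A reports k as a trough; B requires a real left neighbour (index i-k-1 nonnegative) and omits k, which is the intended meaning of the guard. — e.g. on troughs([5, 4, 3, 4, 5, 1], 2): A returns [2], B returns []
import Mathlib
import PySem

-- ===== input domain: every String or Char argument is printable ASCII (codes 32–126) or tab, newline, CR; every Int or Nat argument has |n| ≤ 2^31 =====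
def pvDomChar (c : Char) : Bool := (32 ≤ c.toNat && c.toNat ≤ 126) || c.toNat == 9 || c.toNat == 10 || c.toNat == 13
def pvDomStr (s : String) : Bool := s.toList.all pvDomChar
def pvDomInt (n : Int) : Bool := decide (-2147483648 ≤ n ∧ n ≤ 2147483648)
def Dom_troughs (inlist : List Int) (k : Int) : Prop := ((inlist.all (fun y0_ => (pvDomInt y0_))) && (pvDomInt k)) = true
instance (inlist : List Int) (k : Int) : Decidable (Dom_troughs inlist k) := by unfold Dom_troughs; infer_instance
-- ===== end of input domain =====

-- B tests each index against precomputed non-increasing run lengths (one forward and one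
-- backward scan) instead of A's per-index sorted-slice checks; B also fixes A's accidental
-- negative-index wraparound at i = k (stated as D_) and returns where A raises IndexError
-- at the right edge (those inputs are excluded by Pre_).

-- ===== PORT A =====
-- inlist[i+k+1] raises IndexError exactly on the inputs excluded by Pre_troughs;
-- the pyGetD default 0 is never reached under Pre_ (short-circuit: conjuncts 1-3 fail there).
def troughs (inlist : List Int) (k : Int) : List Int :=
  let k := if k < 1 then 2 else k
  (PySem.List.pyRange k ((inlist.length : Int) - k) 1).foldl
    (fun num i =>
      if PySem.List.slice inlist (some (i - k)) (some (i + 1)) =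
           PySem.List.sorted (PySem.List.slice inlist (some (i - k)) (some (i + 1))) (fun x => x) true
         ∧ PySem.List.slice inlist (some i) (some (i + k + 1)) =
           PySem.List.sorted (PySem.List.slice inlist (some i) (some (i + k + 1))) (fun x => x) false
         ∧ PySem.List.pyGetD inlist (i - k) 0 > PySem.List.pyGetD inlist (i - k - 1) 0
         ∧ PySem.List.pyGetD inlist (i + k) 0 > PySem.List.pyGetD inlist (i + k + 1) 0
      then num ++ [i] else num) []

-- ===== PORT B =====
-- _runs from Source B: one forward pass, run lengths of maximal non-increasing runs.
def pvRuns (xs : List Int) : List Int :=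
  (xs.foldl (fun (s : List Int × Option Int × Int) x =>
      let cur : Int := match s.2.1 with
        | some p => if p ≥ x then s.2.2 + 1 else 1
        | none => 1
      (s.1 ++ [cur], some x, cur)) ([], none, 0)).1

def troughs_alt (inlist : List Int) (k : Int) : List Int :=
  let k := if k < 1 then 2 else k
  let n : Int := inlist.length
  if n < 2 * k + 2 then []
  else
    let down := pvRuns inlist
    let up := (pvRuns inlist.reverse).reverse
    (PySem.List.pyRange (k + 1) (n - k - 1) 1).filter
      (fun i => PySem.List.pyGetD down i 0 == k + 1 && PySem.List.pyGetD up i 0 == k + 1)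

-- ===== PRECONDITION & SPEC =====
-- window predicates on indices (inputs only; no port is referenced)
def pvNonincOn (xs : List Int) (a b : Int) : Prop :=
  ∀ j ∈ PySem.List.pyRange a b 1, PySem.List.pyGetD xs (j + 1) 0 ≤ PySem.List.pyGetD xs j 0
def pvNondecOn (xs : List Int) (a b : Int) : Prop :=
  ∀ j ∈ PySem.List.pyRange a b 1, PySem.List.pyGetD xs j 0 ≤ PySem.List.pyGetD xs (j + 1) 0

-- Pre_ excludes exactly the inputs on which A raises IndexError: the trough test fires at
-- the last loop index i = n-k-1, where A reads inlist[i+k+1] = inlist[n].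
def Pre_troughs (inlist : List Int) (k : Int) : Prop :=
  ¬ (2 * (if k < 1 then 2 else k) + 1 ≤ (inlist.length : Int)
     ∧ pvNonincOn inlist ((inlist.length : Int) - 2 * (if k < 1 then 2 else k) - 1) ((inlist.length : Int) - (if k < 1 then 2 else k) - 1)
     ∧ pvNondecOn inlist ((inlist.length : Int) - (if k < 1 then 2 else k) - 1) ((inlist.length : Int) - 1)
     ∧ PySem.List.pyGetD inlist ((inlist.length : Int) - 2 * (if k < 1 then 2 else k) - 2) 0
         < PySem.List.pyGetD inlist ((inlist.length : Int) - 2 * (if k < 1 then 2 else k) - 1) 0)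
instance (inlist : List Int) (k : Int) : Decidable (Pre_troughs inlist k) := by unfold Pre_troughs pvNonincOn pvNondecOn; infer_instance

def pvWitness_troughs : List Int × Int := ([1, 9, 5, 2, 5, 9, 1], 2)

-- On inputs whose trough test fires at the very first loop index i = k, A's left guard
-- index i-k-1 is -1, so Python wraps around to the last element of the list and A reports
-- k as a trough; B requires a genuine left neighbour (i-k-1 nonnegative) and omits k,
-- which is the intended meaning of the guard.
def D_troughs (inlist : List Int) (k : Int) : Prop :=
  let K := (if k < 1 then 2 else k).toNat
  2 * K + 2 ≤ inlist.length
  ∧ (inlist.take (K + 1)).Pairwise (· ≥ ·)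
  ∧ ((inlist.drop K).take (K + 1)).Pairwise (· ≤ ·)
  ∧ inlist.getD (inlist.length - 1) 0 < inlist.getD 0 0
  ∧ inlist.getD (2 * K + 1) 0 < inlist.getD (2 * K) 0
instance (inlist : List Int) (k : Int) : Decidable (D_troughs inlist k) := by unfold D_troughs; infer_instance

def Spec_troughs (inlist : List Int) (k : Int) (out : List Int) : Prop :=
  ¬ D_troughs inlist k → out = troughs_alt inlist k
instance (inlist : List Int) (k : Int) (out : List Int) : Decidable (Spec_troughs inlist k out) := by unfold Spec_troughs; infer_instance

def pvDiffWitness_troughs : List Int × Int := ([5, 4, 3, 4, 5, 1], 2)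
def pvDiffWitnessOut_troughs : (List Int) × (List Int) := ([2], [])

-- ===== CLAIM (what is proved, stated in full; the proofs are below) =====
def Claim_unchanged_troughs : Prop := ∀ (inlist : List Int) (k : Int), Dom_troughs inlist k → Pre_troughs inlist k → Spec_troughs inlist k (troughs inlist k)
def Claim_changed_troughs : Prop := Dom_troughs (pvDiffWitness_troughs.1) (pvDiffWitness_troughs.2) ∧ Pre_troughs (pvDiffWitness_troughs.1) (pvDiffWitness_troughs.2) ∧ D_troughs (pvDiffWitness_troughs.1) (pvDiffWitness_troughs.2) ∧ troughs (pvDiffWitness_troughs.1) (pvDiffWitness_troughs.2) = pvDiffWitnessOut_troughs.1 ∧ troughs_alt (pvDiffWitness_troughs.1) (pvDiffWitness_troughs.2) = pvDiffWitnessOut_troughs.2 ∧ pvDiffWitnessOut_troughs.1 ≠ pvDiffWitnessOut_troughs.2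
def Claim_exact_troughs : Prop := ∀ (inlist : List Int) (k : Int), Dom_troughs inlist k → Pre_troughs inlist k → D_troughs inlist k → troughs inlist k ≠ troughs_alt inlist k

-- ===== LEMMAS AND PROOFS =====

-- A's per-index trough test, and A as a filter
def CondA (xs : List Int) (K i : Int) : Bool :=
  decide (PySem.List.slice xs (some (i - K)) (some (i + 1)) =
    PySem.List.sorted (PySem.List.slice xs (some (i - K)) (some (i + 1))) (fun x => x) true
  ∧ PySem.List.slice xs (some i) (some (i + K + 1)) =
    PySem.List.sorted (PySem.List.slice xs (some i) (some (i + K + 1))) (fun x => x) false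
  ∧ PySem.List.pyGetD xs (i - K) 0 > PySem.List.pyGetD xs (i - K - 1) 0
  ∧ PySem.List.pyGetD xs (i + K) 0 > PySem.List.pyGetD xs (i + K + 1) 0)

lemma troughs_eq_filter (xs : List Int) (k : Int) :
    troughs xs k = (PySem.List.pyRange (if k < 1 then 2 else k) ((xs.length : Int) - (if k < 1 then 2 else k)) 1).filter
      (fun i => CondA xs (if k < 1 then 2 else k) i) := by
  unfold troughs
  rw [PySem.List.foldl_append_ite_eq_filter]
  simp only [List.nil_append]
  rfl

-- B's per-index test, and B as a filter
def CondB (xs : List Int) (K i : Int) : Bool :=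
  PySem.List.pyGetD (pvRuns xs) i 0 == K + 1 && PySem.List.pyGetD ((pvRuns xs.reverse).reverse) i 0 == K + 1

lemma troughs_alt_eq_filter (xs : List Int) (k : Int) :
    troughs_alt xs k =
      if (xs.length : Int) < 2 * (if k < 1 then 2 else k) + 2 then []
      else (PySem.List.pyRange ((if k < 1 then 2 else k) + 1) ((xs.length : Int) - (if k < 1 then 2 else k) - 1) 1).filter
        (fun i => CondB xs (if k < 1 then 2 else k) i) := by
  unfold troughs_alt CondB
  rfl

-- runLen: mathematical run-length recursion
def runLen (xs : List Int) : Nat → Int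
  | 0 => 1
  | i + 1 => if xs.getD (i+1) 0 ≤ xs.getD i 0 then runLen xs i + 1 else 1

lemma runLen_pos (xs : List Int) (i : Nat) : 1 ≤ runLen xs i := by
  induction i with
  | zero => simp [runLen]
  | succ i ih => simp only [runLen]; split <;> omega

lemma runLen_append (xs ys : List Int) (j : Nat) (hj : j < xs.length) :
    runLen (xs ++ ys) j = runLen xs j := by
  induction j with
  | zero => rfl
  | succ j ih =>
    simp only [runLen]
    rw [List.getD_append _ _ _ _ (by omega : j + 1 < xs.length),
      List.getD_append _ _ _ _ (by omega : j < xs.length), ih (by omega)]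

lemma pvRuns_aux (xs : List Int) :
    xs.foldl (fun (s : List Int × Option Int × Int) x =>
      let cur : Int := match s.2.1 with
        | some p => if p ≥ x then s.2.2 + 1 else 1
        | none => 1
      (s.1 ++ [cur], some x, cur)) ([], none, 0)
    = ((List.range xs.length).map (runLen xs), xs.getLast?,
        if xs.length = 0 then 0 else runLen xs (xs.length - 1)) := by
  induction xs using List.reverseRecOn with
  | nil => simp
  | append_singleton xs x ih =>
    rw [List.foldl_append, ih]
    rcases List.eq_nil_or_concat xs with rfl | ⟨_, _, hne⟩
    · simp [runLen, List.range_succ]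
    · have hxs : xs ≠ [] := by subst hne; simp
      have hn : 1 ≤ xs.length := by
        cases xs with | nil => simp at hxs | cons a t => simp
      obtain ⟨m, hm⟩ : ∃ m, xs.length = m + 1 := ⟨xs.length - 1, by omega⟩
      have hlast : xs.getLast? = some (xs.getD m 0) := by
        have e : xs.length - 1 = m := by omega
        rw [List.getLast?_eq_getElem?, e, List.getElem?_eq_getElem (by omega)]
        rw [List.getD_eq_getElem xs 0 (show m < xs.length by omega)]
      have hrl : runLen (xs ++ [x]) (m + 1)
          = if xs.getD m 0 ≥ x then runLen xs m + 1 else 1 := by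
        simp only [runLen]
        rw [List.getD_append _ _ _ _ (by omega : m < xs.length),
          List.getD_append_right _ _ _ _ (by omega : xs.length ≤ m + 1),
          runLen_append xs [x] m (by omega)]
        simp [hm, ge_iff_le]
      have hmap : (List.range (xs.length + 1)).map (runLen (xs ++ [x]))
          = (List.range xs.length).map (runLen xs) ++ [runLen (xs ++ [x]) xs.length] := by
        rw [List.range_succ, List.map_append]
        congr 1
        exact List.map_congr_left (fun t ht => runLen_append xs [x] t (List.mem_range.mp ht))
      simp only [List.foldl_cons, List.foldl_nil, hlast, List.length_append,
        List.length_singleton, hmap, Prod.mk.injEq]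
      refine ⟨?_, by simp, ?_⟩
      · rw [hm, hrl]
        split <;> simp
      · rw [hm]
        simp only [Nat.add_sub_cancel, hrl]
        split <;> simp

lemma pvRuns_eq (xs : List Int) : pvRuns xs = (List.range xs.length).map (runLen xs) := by
  unfold pvRuns
  rw [pvRuns_aux]

lemma runLen_eq_one_iff (xs : List Int) (i : Nat) (hi : 1 ≤ i) :
    runLen xs i = 1 ↔ ¬ xs.getD i 0 ≤ xs.getD (i-1) 0 := by
  obtain ⟨j, rfl⟩ : ∃ j, i = j + 1 := ⟨i - 1, by omega⟩
  have := runLen_pos xs j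
  simp only [runLen, Nat.add_sub_cancel]
  split <;> simp_all <;> omega

lemma runLen_window (xs : List Int) (m i : Nat) (hm : 1 ≤ m) (hi : m + 1 ≤ i) :
    runLen xs i = (m : Int) + 1 ↔
      ((∀ t : Nat, i - m ≤ t → t < i → xs.getD (t+1) 0 ≤ xs.getD t 0)
        ∧ ¬ xs.getD (i-m) 0 ≤ xs.getD (i-m-1) 0) := by
  induction m generalizing i with
  | zero => omega
  | succ m ih =>
    obtain ⟨j, rfl⟩ : ∃ j, i = j + 1 := ⟨i - 1, by omega⟩
    rcases Nat.eq_zero_or_pos m with rfl | hm'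
    · -- base: m = 1 overall (the m.succ = 1 case)
      have h1 := runLen_eq_one_iff xs j (by omega)
      have hp := runLen_pos xs j
      constructor
      · intro h
        have hstep : xs.getD (j+1) 0 ≤ xs.getD j 0 ∧ runLen xs j = 1 := by
          by_cases hs : xs.getD (j+1) 0 ≤ xs.getD j 0
          · refine ⟨hs, ?_⟩
            simp only [runLen, if_pos hs] at h; omega
          · simp only [runLen, if_neg hs] at h; omega
        refine ⟨?_, ?_⟩
        · intro t ht1 ht2
          have : t = j := by omega
          subst this; exact hstep.1
        · have := h1.mp hstep.2
          simpa [show j + 1 - 1 = j by omega, show j + 1 - 1 - 1 = j - 1 by omega] using this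
      · rintro ⟨hall, hstrict⟩
        have hs : xs.getD (j+1) 0 ≤ xs.getD j 0 := hall j (by omega) (by omega)
        have : runLen xs j = 1 := h1.mpr (by
          simpa [show j + 1 - 1 = j by omega, show j + 1 - 1 - 1 = j - 1 by omega] using hstrict)
        simp only [runLen, if_pos hs, this]
        norm_num
    · -- step
      have hIH := ih (i := j) (by omega) (by omega)
      constructor
      · intro h
        have hstep : xs.getD (j+1) 0 ≤ xs.getD j 0 ∧ runLen xs j = (m : Int) + 1 := by
          by_cases hs : xs.getD (j+1) 0 ≤ xs.getD j 0
          · refine ⟨hs, ?_⟩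
            simp only [runLen, if_pos hs] at h; push_cast at h ⊢; omega
          · simp only [runLen, if_neg hs] at h
            exfalso; push_cast at h; omega
        obtain ⟨hall, hstrict⟩ := hIH.mp hstep.2
        refine ⟨?_, ?_⟩
        · intro t ht1 ht2
          rcases Nat.lt_or_ge t j with h' | h'
          · exact hall t (by omega) h'
          · have : t = j := by omega
            subst this; exact hstep.1
        · simpa [Nat.succ_sub_succ] using hstrict
      · rintro ⟨hall, hstrict⟩
        have hs : xs.getD (j+1) 0 ≤ xs.getD j 0 := hall j (by omega) (by omega)
        have : runLen xs j = (m : Int) + 1 := hIH.mpr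
          ⟨fun t ht1 ht2 => hall t (by omega) (by omega), by simpa [Nat.succ_sub_succ] using hstrict⟩
        simp only [runLen, if_pos hs, this]; push_cast; ring

-- slice == its sort ⟺ monotone window
lemma take_drop_chain_iff (xs : List Int) (a b : Nat) (hb : b ≤ xs.length)
    (R : Int → Int → Prop) :
    (∀ (i : Nat) (_ : i + 1 < (List.take (b - a) (List.drop a xs)).length),
        R (List.take (b - a) (List.drop a xs))[i] (List.take (b - a) (List.drop a xs))[i+1])
    ↔ ∀ t : Nat, a ≤ t → t + 1 < b → R (xs.getD t 0) (xs.getD (t+1) 0) := by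
  have hlen : (List.take (b - a) (List.drop a xs)).length = min (b - a) (xs.length - a) := by
    simp
  have hget : ∀ (i : Nat) (h : i < (List.take (b - a) (List.drop a xs)).length),
      (List.take (b - a) (List.drop a xs))[i] = xs.getD (a + i) 0 := by
    intro i h
    rw [List.getElem_take, List.getElem_drop,
      List.getD_eq_getElem xs 0 (by rw [hlen] at h; omega)]
  constructor
  · intro h t ht1 ht2
    have hi : (t - a) + 1 < (List.take (b - a) (List.drop a xs)).length := by rw [hlen]; omega
    have := h (t - a) hi
    rw [hget _ (by omega), hget _ hi] at this
    have e1 : a + (t - a) = t := by omega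
    have e2 : a + ((t - a) + 1) = t + 1 := by omega
    rw [e1, e2] at this
    exact this
  · intro h i hi
    rw [hget _ (by omega), hget _ hi]
    exact h (a + i) (by omega) (by rw [hlen] at hi; omega)

lemma slice_sorted_rev_iff (xs : List Int) (a b : Nat) (hb : b ≤ xs.length) :
    (PySem.List.slice xs (some (a:Int)) (some (b:Int)) =
      PySem.List.sorted (PySem.List.slice xs (some (a:Int)) (some (b:Int))) (fun x => x) true)
    ↔ ∀ t : Nat, a ≤ t → t + 1 < b → xs.getD (t+1) 0 ≤ xs.getD t 0 := by
  have hs : PySem.List.slice xs (some (a:Int)) (some (b:Int)) = List.take (b - a) (List.drop a xs) := by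
    simp [pysem]
  rw [hs]
  have hP : (List.take (b - a) (List.drop a xs)).Pairwise (fun p q : Int => q ≤ p)
      ↔ ∀ t : Nat, a ≤ t → t + 1 < b → xs.getD (t+1) 0 ≤ xs.getD t 0 := by
    rw [← @List.isChain_iff_pairwise Int (fun p q : Int => q ≤ p) (List.take (b - a) (List.drop a xs)) ⟨fun h1 h2 => le_trans h2 h1⟩,
      List.isChain_iff_getElem]
    exact take_drop_chain_iff xs a b hb (fun p q => q ≤ p)
  constructor
  · intro h
    refine hP.mp ?_
    have := PySem.List.sorted_pairwise_rev (List.take (b - a) (List.drop a xs)) (fun x => x)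
    rw [← h] at this
    exact this
  · intro h
    exact (PySem.List.sorted_rev_eq_self_of_pairwise _ _ (hP.mpr h)).symm

lemma slice_sorted_iff (xs : List Int) (a b : Nat) (hb : b ≤ xs.length) :
    (PySem.List.slice xs (some (a:Int)) (some (b:Int)) =
      PySem.List.sorted (PySem.List.slice xs (some (a:Int)) (some (b:Int))) (fun x => x) false)
    ↔ ∀ t : Nat, a ≤ t → t + 1 < b → xs.getD t 0 ≤ xs.getD (t+1) 0 := by
  have hs : PySem.List.slice xs (some (a:Int)) (some (b:Int)) = List.take (b - a) (List.drop a xs) := by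
    simp [pysem]
  rw [hs]
  have hP : (List.take (b - a) (List.drop a xs)).Pairwise (fun p q : Int => p ≤ q)
      ↔ ∀ t : Nat, a ≤ t → t + 1 < b → xs.getD t 0 ≤ xs.getD (t+1) 0 := by
    rw [← @List.isChain_iff_pairwise Int (fun p q : Int => p ≤ q) (List.take (b - a) (List.drop a xs)) ⟨fun h1 h2 => le_trans h1 h2⟩,
      List.isChain_iff_getElem]
    exact take_drop_chain_iff xs a b hb (fun p q => p ≤ q)
  constructor
  · intro h
    refine hP.mp ?_
    have := PySem.List.sorted_pairwise (List.take (b - a) (List.drop a xs)) (fun x => x)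
    rw [← h] at this
    exact this
  · intro h
    exact (PySem.List.sorted_eq_self_of_pairwise _ _ (hP.mpr h)).symm

lemma pvNonincOn_iff_forall (xs : List Int) (a b : Int) (ha : 0 ≤ a) :
    pvNonincOn xs a b ↔ ∀ t : Nat, a ≤ (t:Int) → (t:Int) < b → xs.getD (t+1) 0 ≤ xs.getD t 0 := by
  unfold pvNonincOn
  constructor
  · intro h t ht1 ht2
    have := h t (PySem.List.mem_pyRange_one.mpr ⟨ht1, ht2⟩)
    rw [show ((t:Int) + 1) = ((t+1 : Nat) : Int) by push_cast; ring,
      PySem.List.pyGetD_natCast, PySem.List.pyGetD_natCast] at this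
    exact this
  · intro h j hj
    obtain ⟨h1, h2⟩ := PySem.List.mem_pyRange_one.mp hj
    obtain ⟨t, rfl⟩ : ∃ t : Nat, j = (t:Int) := ⟨j.toNat, by omega⟩
    rw [show ((t:Int) + 1) = ((t+1 : Nat) : Int) by push_cast; ring,
      PySem.List.pyGetD_natCast, PySem.List.pyGetD_natCast]
    exact h t h1 h2

lemma pvNondecOn_iff_forall (xs : List Int) (a b : Int) (ha : 0 ≤ a) :
    pvNondecOn xs a b ↔ ∀ t : Nat, a ≤ (t:Int) → (t:Int) < b → xs.getD t 0 ≤ xs.getD (t+1) 0 := by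
  unfold pvNondecOn
  constructor
  · intro h t ht1 ht2
    have := h t (PySem.List.mem_pyRange_one.mpr ⟨ht1, ht2⟩)
    rw [show ((t:Int) + 1) = ((t+1 : Nat) : Int) by push_cast; ring,
      PySem.List.pyGetD_natCast, PySem.List.pyGetD_natCast] at this
    exact this
  · intro h j hj
    obtain ⟨h1, h2⟩ := PySem.List.mem_pyRange_one.mp hj
    obtain ⟨t, rfl⟩ : ∃ t : Nat, j = (t:Int) := ⟨j.toNat, by omega⟩
    rw [show ((t:Int) + 1) = ((t+1 : Nat) : Int) by push_cast; ring,
      PySem.List.pyGetD_natCast, PySem.List.pyGetD_natCast]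
    exact h t h1 h2

lemma condA_iff_windows (xs : List Int) (K i : Int) (hK : 1 ≤ K) (hi : K ≤ i)
    (hi2 : i < (xs.length : Int) - K) :
    CondA xs K i = true ↔ (pvNonincOn xs (i - K) i ∧ pvNondecOn xs i (i + K)
      ∧ PySem.List.pyGetD xs (i - K - 1) 0 < PySem.List.pyGetD xs (i - K) 0
      ∧ PySem.List.pyGetD xs (i + K + 1) 0 < PySem.List.pyGetD xs (i + K) 0) := by
  obtain ⟨κ, rfl⟩ : ∃ κ : Nat, K = (κ:Int) := ⟨K.toNat, by omega⟩
  obtain ⟨ι, rfl⟩ : ∃ ι : Nat, i = (ι:Int) := ⟨i.toNat, by omega⟩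
  have e1 : (ι:Int) - κ = ((ι - κ : Nat) : Int) := by omega
  have e2 : (ι:Int) + 1 = ((ι + 1 : Nat) : Int) := by omega
  have e3 : (ι:Int) + κ + 1 = ((ι + κ + 1 : Nat) : Int) := by omega
  have hb1 : ι + 1 ≤ xs.length := by omega
  have hb2 : ι + κ + 1 ≤ xs.length := by omega
  unfold CondA
  rw [decide_eq_true_eq]
  rw [e1, e2, e3, slice_sorted_rev_iff xs (ι - κ) (ι + 1) hb1,
    slice_sorted_iff xs ι (ι + κ + 1) hb2,
    pvNonincOn_iff_forall xs _ _ (by omega), pvNondecOn_iff_forall xs _ _ (by omega)]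
  constructor
  · rintro ⟨c1, c2, c3, c4⟩
    exact ⟨fun t h1 h2 => c1 t (by omega) (by omega),
      fun t h1 h2 => c2 t (by omega) (by omega), c3, c4⟩
  · rintro ⟨c1, c2, c3, c4⟩
    exact ⟨fun t h1 h2 => c1 t (by omega) (by omega),
      fun t h1 h2 => c2 t (by omega) (by omega), c3, c4⟩

lemma pyGetD_neg_one (xs : List Int) (h : 1 ≤ xs.length) :
    PySem.List.pyGetD xs (-1) 0 = PySem.List.pyGetD xs ((xs.length : Int) - 1) 0 := by
  simp [PySem.List.pyGetD, PySem.List.pyGet?, PySem.List.pyIdx?, h]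

lemma getD_reverse (xs : List Int) (t : Nat) (h : t < xs.length) :
    xs.reverse.getD t 0 = xs.getD (xs.length - 1 - t) 0 := by
  rw [List.getD_eq_getElem _ _ (by simpa using h), List.getElem_reverse,
    List.getD_eq_getElem _ _ (by omega)]

lemma condB_iff_windows (xs : List Int) (K i : Int) (hK : 1 ≤ K) (hi : K + 1 ≤ i)
    (hi2 : i < (xs.length : Int) - K - 1) :
    CondB xs K i = true ↔ (pvNonincOn xs (i - K) i ∧ pvNondecOn xs i (i + K)
      ∧ PySem.List.pyGetD xs (i - K - 1) 0 < PySem.List.pyGetD xs (i - K) 0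
      ∧ PySem.List.pyGetD xs (i + K + 1) 0 < PySem.List.pyGetD xs (i + K) 0) := by
  obtain ⟨κ, rfl⟩ : ∃ κ : Nat, K = (κ:Int) := ⟨K.toNat, by omega⟩
  obtain ⟨ι, rfl⟩ : ∃ ι : Nat, i = (ι:Int) := ⟨i.toNat, by omega⟩
  have hκ1 : 1 ≤ κ := by omega
  have hιb : κ + 1 ≤ ι := by omega
  have hn : ι + κ + 2 ≤ xs.length := by omega
  have hd : PySem.List.pyGetD (pvRuns xs) (ι:Int) 0 = runLen xs ι := by
    rw [pvRuns_eq, PySem.List.pyGetD_natCast,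
      List.getD_eq_getElem _ _ (by simp; omega)]
    simp
  have hu : PySem.List.pyGetD ((pvRuns xs.reverse).reverse) (ι:Int) 0
      = runLen xs.reverse (xs.length - 1 - ι) := by
    rw [pvRuns_eq, PySem.List.pyGetD_natCast,
      List.getD_eq_getElem _ _ (by simp; omega), List.getElem_reverse]
    simp
  unfold CondB
  rw [hd, hu]
  simp only [Bool.and_eq_true, beq_iff_eq]
  rw [runLen_window xs κ ι hκ1 (by omega),
    runLen_window xs.reverse κ (xs.length - 1 - ι) hκ1 (by simp; omega),
    pvNonincOn_iff_forall xs _ _ (by omega), pvNondecOn_iff_forall xs _ _ (by omega)]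
  have e1 : (ι:Int) - κ - 1 = ((ι - κ - 1 : Nat) : Int) := by omega
  have e2 : (ι:Int) - κ = ((ι - κ : Nat) : Int) := by omega
  have e3 : (ι:Int) + κ + 1 = ((ι + κ + 1 : Nat) : Int) := by omega
  have e4 : (ι:Int) + κ = ((ι + κ : Nat) : Int) := by omega
  rw [e1, e2, e3, e4, PySem.List.pyGetD_natCast, PySem.List.pyGetD_natCast,
    PySem.List.pyGetD_natCast, PySem.List.pyGetD_natCast]
  have hrevlen : xs.reverse.length = xs.length := List.length_reverse
  constructor
  · rintro ⟨⟨d1, d2⟩, ⟨u1, u2⟩⟩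
    refine ⟨fun t h1 h2 => d1 t (by omega) (by omega), ?_, ?_, ?_⟩
    · intro t h1 h2
      have := u1 (xs.length - 2 - t) (by omega) (by omega)
      rw [getD_reverse _ _ (by omega), getD_reverse _ _ (by omega)] at this
      have f1 : xs.length - 1 - (xs.length - 2 - t + 1) = t := by omega
      have f2 : xs.length - 1 - (xs.length - 2 - t) = t + 1 := by omega
      rw [f1, f2] at this
      exact this
    · exact lt_of_not_ge fun hle => d2 (by
        have f : ι - κ - 1 + 1 = ι - κ := by omega
        omega)
    · rw [getD_reverse _ _ (by omega), getD_reverse _ _ (by omega)] at u2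
      have f1 : xs.length - 1 - (xs.length - 1 - ι - κ) = ι + κ := by omega
      have f2 : xs.length - 1 - (xs.length - 1 - ι - κ - 1) = ι + κ + 1 := by omega
      rw [f1, f2] at u2
      exact lt_of_not_ge u2
  · rintro ⟨c1, c2, c3, c4⟩
    refine ⟨⟨fun t h1 h2 => c1 t (by omega) (by omega), ?_⟩, ?_, ?_⟩
    · intro hle
      exact absurd c3 (not_lt_of_ge (by omega))
    · intro t h1 h2
      rw [getD_reverse _ _ (by omega), getD_reverse _ _ (by omega)]
      have := c2 (xs.length - 2 - t) (by omega) (by omega)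
      have f1 : xs.length - 1 - (t + 1) = xs.length - 2 - t := by omega
      have f2 : xs.length - 1 - t = xs.length - 2 - t + 1 := by omega
      rw [f1, f2]
      exact this
    · intro hle
      rw [getD_reverse _ _ (by omega), getD_reverse _ _ (by omega)] at hle
      have f1 : xs.length - 1 - (xs.length - 1 - ι - κ) = ι + κ := by omega
      have f2 : xs.length - 1 - (xs.length - 1 - ι - κ - 1) = ι + κ + 1 := by omega
      rw [f1, f2] at hle
      exact absurd c4 (not_lt_of_ge hle)

lemma D_iff_windows (xs : List Int) (k : Int) :
    D_troughs xs k ↔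
      (2 * (if k < 1 then 2 else k) + 2 ≤ (xs.length : Int)
        ∧ pvNonincOn xs 0 (if k < 1 then 2 else k)
        ∧ pvNondecOn xs (if k < 1 then 2 else k) (2 * (if k < 1 then 2 else k))
        ∧ PySem.List.pyGetD xs ((xs.length : Int) - 1) 0 < PySem.List.pyGetD xs 0 0
        ∧ PySem.List.pyGetD xs (2 * (if k < 1 then 2 else k) + 1) 0
            < PySem.List.pyGetD xs (2 * (if k < 1 then 2 else k)) 0) := by
  have hK : 1 ≤ (if k < 1 then 2 else k) := by split <;> omega
  set K : Int := if k < 1 then 2 else k with hKdef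
  obtain ⟨κ, hκ⟩ : ∃ κ : Nat, K = (κ:Int) := ⟨K.toNat, by omega⟩
  have hκt : K.toNat = κ := by omega
  unfold D_troughs
  dsimp only
  rw [← hKdef, hκt, hκ]
  have hpair1 : ∀ (hb : κ + 1 ≤ xs.length),
      ((xs.take (κ+1)).Pairwise (· ≥ ·) ↔
        ∀ t : Nat, 0 ≤ t → t + 1 < κ + 1 → xs.getD t 0 ≥ xs.getD (t+1) 0) := by
    intro hb
    have h0 : xs.take (κ+1) = List.take ((κ+1) - 0) (List.drop 0 xs) := by simp
    rw [h0, ← @List.isChain_iff_pairwise Int (· ≥ ·) _ ⟨fun h1 h2 => le_trans h2 h1⟩,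
      List.isChain_iff_getElem]
    exact take_drop_chain_iff xs 0 (κ+1) hb (· ≥ ·)
  have hpair2 : ∀ (hb : 2*κ + 1 ≤ xs.length),
      (((xs.drop κ).take (κ+1)).Pairwise (· ≤ ·) ↔
        ∀ t : Nat, κ ≤ t → t + 1 < 2*κ + 1 → xs.getD t 0 ≤ xs.getD (t+1) 0) := by
    intro hb
    have h0 : (xs.drop κ).take (κ+1) = List.take ((2*κ+1) - κ) (List.drop κ xs) := by
      congr 1; omega
    rw [h0, ← @List.isChain_iff_pairwise Int (· ≤ ·) _ ⟨fun h1 h2 => le_trans h1 h2⟩,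
      List.isChain_iff_getElem]
    exact take_drop_chain_iff xs κ (2*κ+1) hb (· ≤ ·)
  constructor
  · rintro ⟨h1, h2, h3, h4, h5⟩
    have e1 : (xs.length : Int) - 1 = ((xs.length - 1 : Nat) : Int) := by omega
    have e2 : 2 * (κ:Int) + 1 = ((2*κ+1 : Nat) : Int) := by omega
    have e3 : 2 * (κ:Int) = ((2*κ : Nat) : Int) := by omega
    refine ⟨by omega, ?_, ?_, ?_, ?_⟩
    · rw [pvNonincOn_iff_forall xs _ _ le_rfl]
      intro t ht1 ht2
      exact (hpair1 (by omega)).mp h2 t (by omega) (by omega)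
    · rw [pvNondecOn_iff_forall xs _ _ (by omega)]
      intro t ht1 ht2
      exact (hpair2 (by omega)).mp h3 t (by omega) (by omega)
    · rw [e1, PySem.List.pyGetD_natCast, PySem.List.pyGetD_ofNat']
      exact h4
    · rw [e2, e3, PySem.List.pyGetD_natCast, PySem.List.pyGetD_natCast]
      exact h5
  · rintro ⟨h1, h2, h3, h4, h5⟩
    have e1 : (xs.length : Int) - 1 = ((xs.length - 1 : Nat) : Int) := by omega
    have e2 : 2 * (κ:Int) + 1 = ((2*κ+1 : Nat) : Int) := by omega
    have e3 : 2 * (κ:Int) = ((2*κ : Nat) : Int) := by omega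
    rw [pvNonincOn_iff_forall xs _ _ le_rfl] at h2
    rw [pvNondecOn_iff_forall xs _ _ (by omega)] at h3
    rw [e1, PySem.List.pyGetD_natCast, PySem.List.pyGetD_ofNat'] at h4
    rw [e2, e3, PySem.List.pyGetD_natCast, PySem.List.pyGetD_natCast] at h5
    refine ⟨by omega, ?_, ?_, h4, h5⟩
    · exact (hpair1 (by omega)).mpr (fun t ht1 ht2 => h2 t (by omega) (by omega))
    · exact (hpair2 (by omega)).mpr (fun t ht1 ht2 => h3 t (by omega) (by omega))

lemma condA_right_edge (xs : List Int) (K : Int) (hK : 1 ≤ K)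
    (hb : 2*K+1 ≤ (xs.length:Int)) (hca : CondA xs K ((xs.length:Int) - K - 1) = true) :
    2 * K + 1 ≤ (xs.length : Int)
    ∧ pvNonincOn xs ((xs.length : Int) - 2 * K - 1) ((xs.length : Int) - K - 1)
    ∧ pvNondecOn xs ((xs.length : Int) - K - 1) ((xs.length : Int) - 1)
    ∧ PySem.List.pyGetD xs ((xs.length : Int) - 2 * K - 2) 0
        < PySem.List.pyGetD xs ((xs.length : Int) - 2 * K - 1) 0 := by
  have hw := (condA_iff_windows xs K ((xs.length:Int) - K - 1) hK (by omega) (by omega)).mp hca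
  refine ⟨hb, ?_, ?_, ?_⟩
  · rw [show (xs.length:Int) - 2*K - 1 = (xs.length:Int) - K - 1 - K by ring]
    exact hw.1
  · rw [show (xs.length:Int) - 1 = (xs.length:Int) - K - 1 + K by ring]
    exact hw.2.1
  · rw [show (xs.length:Int) - 2*K - 2 = (xs.length:Int) - K - 1 - K - 1 by ring,
      show (xs.length:Int) - 2*K - 1 = (xs.length:Int) - K - 1 - K by ring]
    exact hw.2.2.1

lemma condA_left_edge_iff (xs : List Int) (K : Int) (hK : 1 ≤ K)
    (hb : 2*K+2 ≤ (xs.length:Int)) :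
    CondA xs K K = true ↔
      (pvNonincOn xs 0 K ∧ pvNondecOn xs K (2*K)
        ∧ PySem.List.pyGetD xs ((xs.length : Int) - 1) 0 < PySem.List.pyGetD xs 0 0
        ∧ PySem.List.pyGetD xs (2*K + 1) 0 < PySem.List.pyGetD xs (2*K) 0) := by
  rw [condA_iff_windows xs K K hK le_rfl (by omega),
    show K - K - 1 = (-1:Int) by ring, show K - K = (0:Int) by ring,
    show K + K + 1 = 2*K+1 by ring, show K + K = 2*K by ring,
    pyGetD_neg_one xs (by omega)]

-- ===== VERDICT (by name: the statement is the Claim_ definition above) =====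
theorem troughs_spec : Claim_unchanged_troughs := by
  intro xs k _ hPre hD
  unfold Pre_troughs at hPre
  rw [D_iff_windows] at hD
  have hK : 1 ≤ (if k < 1 then 2 else k) := by split <;> omega
  rw [troughs_eq_filter, troughs_alt_eq_filter]
  rcases lt_trichotomy ((xs.length : Int)) (2 * (if k < 1 then 2 else k) + 1) with h1 | h2 | h3
  · rw [PySem.List.pyRange_one_eq_nil (by omega),
      if_pos (show (xs.length:Int) < 2 * (if k < 1 then 2 else k) + 2 by omega)]
    rfl
  · have hnca : CondA xs (if k < 1 then 2 else k) (if k < 1 then 2 else k) = false := by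
      rw [Bool.eq_false_iff]
      intro hca
      exact hPre (condA_right_edge xs _ hK (by omega)
        (by rwa [show (xs.length:Int) - (if k < 1 then 2 else k) - 1 = (if k < 1 then 2 else k) by omega]))
    rw [show (xs.length : Int) - (if k < 1 then 2 else k) = (if k < 1 then 2 else k) + 1 by omega,
      PySem.List.pyRange_one_singleton,
      if_pos (show (xs.length:Int) < 2 * (if k < 1 then 2 else k) + 2 by omega)]
    simp [hnca]
  · have hsplit : PySem.List.pyRange (if k < 1 then 2 else k) ((xs.length:Int) - (if k < 1 then 2 else k)) 1
        = [(if k < 1 then 2 else k)] ++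
          (PySem.List.pyRange ((if k < 1 then 2 else k) + 1) ((xs.length:Int) - (if k < 1 then 2 else k) - 1) 1
            ++ [(xs.length:Int) - (if k < 1 then 2 else k) - 1]) := by
      rw [PySem.List.pyRange_one_append (if k < 1 then 2 else k) ((if k < 1 then 2 else k) + 1) _ (by omega) (by omega)]
      congr 1
      · exact PySem.List.pyRange_one_singleton _
      rw [PySem.List.pyRange_one_append ((if k < 1 then 2 else k) + 1) ((xs.length:Int) - (if k < 1 then 2 else k) - 1) _ (by omega) (by omega)]
      congr 1
      have hs1 := PySem.List.pyRange_one_singleton ((xs.length:Int) - (if k < 1 then 2 else k) - 1)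
      rw [show ((xs.length:Int) - (if k < 1 then 2 else k) - 1) + 1 = (xs.length:Int) - (if k < 1 then 2 else k) by ring] at hs1
      exact hs1
    rw [hsplit, List.filter_append, List.filter_append,
      if_neg (show ¬ ((xs.length:Int) < 2 * (if k < 1 then 2 else k) + 2) by omega)]
    have hKfalse : CondA xs (if k < 1 then 2 else k) (if k < 1 then 2 else k) = false := by
      rw [Bool.eq_false_iff]
      intro hca
      exact hD ⟨by omega, (condA_left_edge_iff xs _ hK (by omega)).mp hca⟩
    have hRfalse : CondA xs (if k < 1 then 2 else k) ((xs.length:Int) - (if k < 1 then 2 else k) - 1) = false := by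
      rw [Bool.eq_false_iff]
      intro hca
      exact hPre (condA_right_edge xs _ hK (by omega) hca)
    have hmid : List.filter (fun i => CondA xs (if k < 1 then 2 else k) i)
          (PySem.List.pyRange ((if k < 1 then 2 else k) + 1) ((xs.length:Int) - (if k < 1 then 2 else k) - 1) 1)
        = List.filter (fun i => CondB xs (if k < 1 then 2 else k) i)
          (PySem.List.pyRange ((if k < 1 then 2 else k) + 1) ((xs.length:Int) - (if k < 1 then 2 else k) - 1) 1) := by
      apply List.filter_congr
      intro i hi
      obtain ⟨hi1, hi2⟩ := PySem.List.mem_pyRange_one.mp hi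
      have hiff := (condB_iff_windows xs _ i hK hi1 hi2).trans
        (condA_iff_windows xs _ i hK (by omega) (by omega)).symm
      rw [Bool.eq_iff_iff]
      exact hiff.symm
    rw [hmid]
    simp [hKfalse, hRfalse]

theorem troughs_changed : Claim_changed_troughs := by
  unfold Claim_changed_troughs; decide

theorem troughs_tight : Claim_exact_troughs := by
  intro xs k _ hPre hD heq
  rw [D_iff_windows] at hD
  have hK : 1 ≤ (if k < 1 then 2 else k) := by split <;> omega
  have hca : CondA xs (if k < 1 then 2 else k) (if k < 1 then 2 else k) = true :=
    (condA_left_edge_iff xs _ hK (by omega)).mpr hD.2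
  have hmemA : (if k < 1 then 2 else k) ∈ troughs xs k := by
    rw [troughs_eq_filter]
    exact List.mem_filter.mpr ⟨PySem.List.mem_pyRange_one.mpr ⟨le_rfl, by omega⟩, hca⟩
  rw [heq, troughs_alt_eq_filter,
    if_neg (show ¬ ((xs.length:Int) < 2 * (if k < 1 then 2 else k) + 2) by omega)] at hmemA
  have := (PySem.List.mem_pyRange_one.mp (List.mem_filter.mp hmemA).1).1
  omega
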